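-- pv_equiv track=rewrite | github.com/KvngColl/Me | reverse_lab.py | disasm
-- ===== SOURCE A (Python) =====
-- from typing import Dict, List, Optional
--
-- OP_LOAD_IDX = 0x10     # LOAD_IDX <idx>
--
-- OP_XOR_IMM = 0x20      # XOR      <imm8>
--
-- OP_ROL_IMM = 0x30      # ROL      <imm8>
--
-- OP_ADD_IMM = 0x40      # ADD      <imm8>
--
-- OP_CMP_IMM = 0x50      # CMP      <imm8>
--
-- OP_JNE_FAIL = 0x60     # JNE_FAIL
--
-- OP_RET_OK = 0x70       # RET_OK
--
-- OP_RET_FAIL = 0x71     # RET_FAIL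
--
-- OP_DEAD_ISLAND = 0x90  # DEAD_ISLAND <token>
--
-- OP_GUARD_DECOY = 0xA0  # GUARD_DECOY <lo> <hi>
--
-- OP_INTEGRITY = 0xA1    # INTEGRITY_CHECK
--
-- def disasm(plain: List[int]) -> str:
--     out: List[str] = []
--     ip = 0
--     while ip < len(plain):
--         op = plain[ip]
--         base = f"{ip:04x}: "
--         ip += 1
--
--         if op == OP_LOAD_IDX:
--             idx = plain[ip]
--             ip += 1
--             out.append(f"{base}LOAD_IDX     key[{idx}]")
--         elif op == OP_INTEGRITY:
--             out.append(f"{base}INTEGRITY")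
--         elif op == OP_XOR_IMM:
--             imm = plain[ip]
--             ip += 1
--             out.append(f"{base}XOR          0x{imm:02x}")
--         elif op == OP_ROL_IMM:
--             imm = plain[ip]
--             ip += 1
--             out.append(f"{base}ROL          {imm}")
--         elif op == OP_ADD_IMM:
--             imm = plain[ip]
--             ip += 1
--             out.append(f"{base}ADD          0x{imm:02x}")
--         elif op == OP_CMP_IMM:
--             imm = plain[ip]
--             ip += 1
--             out.append(f"{base}CMP          0x{imm:02x}")
--         elif op == OP_JNE_FAIL:
--             out.append(f"{base}JNE_FAIL")
--         elif op == OP_GUARD_DECOY: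
--             lo = plain[ip]
--             hi = plain[ip + 1]
--             ip += 2
--             out.append(f"{base}GUARD_DECOY 0x{((hi << 8) | lo):04x}")
--         elif op == OP_DEAD_ISLAND:
--             tok = plain[ip]
--             ip += 1
--             out.append(f"{base}DEAD_ISLAND  0x{tok:02x}")
--         elif op == OP_RET_OK:
--             out.append(f"{base}RET_OK")
--         elif op == OP_RET_FAIL:
--             out.append(f"{base}RET_FAIL")
--         else:
--             out.append(f"{base}DB           0x{op:02x}")
--     return "\n".join(out)
-- ===== SOURCE B (Python) =====
-- _LEN = {0x10: 1, 0x20: 1, 0x30: 1, 0x40: 1, 0x50: 1, 0x90: 1, 0xA0: 2}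
--
-- def _cuts(plain):
--     # pass 1: segmentation only — instruction boundary offsets, no formatting
--     cuts = [0]
--     while cuts[-1] < len(plain):
--         i = cuts[-1]
--         cuts.append(i + 1 + _LEN.get(plain[i], 0))
--     return cuts
--
-- def _render(off, chunk):
--     # pass 2: format one instruction chunk [op, *operands] by shape
--     match chunk:
--         case [0x10, idx]:
--             body = f"LOAD_IDX     key[{idx}]"
--         case [0xA1]:
--             body = "INTEGRITY"
--         case [0x20, imm]:
--             body = f"XOR          0x{imm:02x}"
--         case [0x30, imm]:
--             body = f"ROL          {imm}"
--         case [0x40, imm]: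
--             body = f"ADD          0x{imm:02x}"
--         case [0x50, imm]:
--             body = f"CMP          0x{imm:02x}"
--         case [0x60]:
--             body = "JNE_FAIL"
--         case [0xA0, lo, hi]:
--             body = f"GUARD_DECOY 0x{(hi << 8) | lo:04x}"
--         case [0x90, tok]:
--             body = f"DEAD_ISLAND  0x{tok:02x}"
--         case [0x70]:
--             body = "RET_OK"
--         case [0x71]:
--             body = "RET_FAIL"
--         case [op, *_]:
--             body = f"DB           0x{op:02x}"
--     return f"{off:04x}: " + body
--
-- def disasm(plain):
--     cuts = _cuts(plain)
--     return "\n".join(_render(s, plain[s:e]) for s, e in zip(cuts, cuts[1:]))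
-- ===== Notes on version B (the rewrite author's own statement) =====
-- stated objective: alternative
-- what changed: Replaced A's single decode-and-format while loop by two staged passes: a segmentation pass that only computes instruction boundary offsets from an operand-length table, then a formatting pass that slices each chunk and pattern-matches its shape [op, *operands].
import Mathlib
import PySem

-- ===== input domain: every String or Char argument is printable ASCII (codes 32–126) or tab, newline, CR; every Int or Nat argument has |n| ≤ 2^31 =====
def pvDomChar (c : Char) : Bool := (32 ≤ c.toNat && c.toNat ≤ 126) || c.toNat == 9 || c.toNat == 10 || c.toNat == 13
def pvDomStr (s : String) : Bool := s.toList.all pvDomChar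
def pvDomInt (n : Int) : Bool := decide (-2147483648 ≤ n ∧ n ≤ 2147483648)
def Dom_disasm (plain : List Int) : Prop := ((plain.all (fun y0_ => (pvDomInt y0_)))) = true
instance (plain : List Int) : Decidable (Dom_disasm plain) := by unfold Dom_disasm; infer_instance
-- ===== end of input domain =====

-- B replaces A's single decode-and-format while loop by two staged passes: a segmentation
-- pass computing only the instruction boundary offsets, then a formatting pass that pattern
-- matches each sliced chunk [op, *operands] by shape; objective: alternative (not faster).

-- shared formatting helper: Python f"{n:0Wx}" (lowercase hex, zero-padded, sign in front);
-- exact also for negative n (Python pads between '-' and the digits, = str.zfill)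
-- (fuel = n keeps the recursion structural, so the kernel can evaluate it)
def pvHexAux : Nat → Nat → List Char
  | 0, n => [Nat.digitChar n]
  | fuel+1, n => if n < 16 then [Nat.digitChar n] else pvHexAux fuel (n / 16) ++ [Nat.digitChar (n % 16)]

def pvHexNat (n : Nat) : List Char := pvHexAux n n

def pvFmtHex (w : Nat) (n : Int) : String :=
  PySem.Str.zfill (String.ofList ((if n < 0 then ['-'] else []) ++ pvHexNat n.natAbs)) (w : Int)

-- ===== PORT A =====
-- the while loop; out is the accumulator; where Python raises IndexError (operand read past
-- the end, plain[_]? = none) the port stops — those inputs are excluded by Pre_disasm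
def disasmLoop (plain : List Int) : Nat → Nat → List String → List String
  | 0, _, out => out
  | fuel+1, ip, out =>
  if h : ip < plain.length then
    let op := plain[ip]
    let base := pvFmtHex 4 (ip : Int) ++ ": "
    if op = 0x10 then
      match plain[ip+1]? with
      | some idx => disasmLoop plain fuel (ip+2) (out ++ [base ++ "LOAD_IDX     key[" ++ PySem.Int.toStr idx ++ "]"])
      | none => out
    else if op = 0xA1 then disasmLoop plain fuel (ip+1) (out ++ [base ++ "INTEGRITY"])
    else if op = 0x20 then
      match plain[ip+1]? with
      | some imm => disasmLoop plain fuel (ip+2) (out ++ [base ++ "XOR          0x" ++ pvFmtHex 2 imm])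
      | none => out
    else if op = 0x30 then
      match plain[ip+1]? with
      | some imm => disasmLoop plain fuel (ip+2) (out ++ [base ++ "ROL          " ++ PySem.Int.toStr imm])
      | none => out
    else if op = 0x40 then
      match plain[ip+1]? with
      | some imm => disasmLoop plain fuel (ip+2) (out ++ [base ++ "ADD          0x" ++ pvFmtHex 2 imm])
      | none => out
    else if op = 0x50 then
      match plain[ip+1]? with
      | some imm => disasmLoop plain fuel (ip+2) (out ++ [base ++ "CMP          0x" ++ pvFmtHex 2 imm])
      | none => out
    else if op = 0x60 then disasmLoop plain fuel (ip+1) (out ++ [base ++ "JNE_FAIL"])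
    else if op = 0xA0 then
      match plain[ip+1]? with
      | some lo =>
        match plain[ip+2]? with
        | some hi => disasmLoop plain fuel (ip+3) (out ++ [base ++ "GUARD_DECOY 0x" ++ pvFmtHex 4 (PySem.Int.bor (hi <<< (8:Nat)) lo)])
        | none => out
      | none => out
    else if op = 0x90 then
      match plain[ip+1]? with
      | some tok => disasmLoop plain fuel (ip+2) (out ++ [base ++ "DEAD_ISLAND  0x" ++ pvFmtHex 2 tok])
      | none => out
    else if op = 0x70 then disasmLoop plain fuel (ip+1) (out ++ [base ++ "RET_OK"])
    else if op = 0x71 then disasmLoop plain fuel (ip+1) (out ++ [base ++ "RET_FAIL"])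
    else disasmLoop plain fuel (ip+1) (out ++ [base ++ "DB           0x" ++ pvFmtHex 2 op])
  else out

def disasm (plain : List Int) : String := PySem.Str.join "\n" (disasmLoop plain plain.length 0 [])

-- ===== PORT B =====
-- _LEN from Source B: operand byte count per opcode
def pvLenTable : PySem.Dict Int Nat :=
  PySem.Dict.ofList [(0x10, 1), (0x20, 1), (0x30, 1), (0x40, 1), (0x50, 1), (0x90, 1), (0xA0, 2)]

-- pass 1 (_cuts): instruction boundary offsets; cuts[-1] is the recursion argument
-- (fuel = number of remaining cells keeps the recursion structural)
def segLoop (plain : List Int) : Nat → Nat → List Nat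
  | 0, i => [i]
  | fuel+1, i =>
    if h : i < plain.length then i :: segLoop plain fuel (i + 1 + PySem.Dict.getD pvLenTable plain[i] 0)
    else [i]

-- pass 2 (_render): format one chunk [op, *operands] by shape (Python match statement)
def pvRender (off : Nat) (chunk : List Int) : String :=
  pvFmtHex 4 (off : Int) ++ ": " ++
  (match chunk with
   | [0x10, idx] => "LOAD_IDX     key[" ++ PySem.Int.toStr idx ++ "]"
   | [0xA1] => "INTEGRITY"
   | [0x20, imm] => "XOR          0x" ++ pvFmtHex 2 imm
   | [0x30, imm] => "ROL          " ++ PySem.Int.toStr imm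
   | [0x40, imm] => "ADD          0x" ++ pvFmtHex 2 imm
   | [0x50, imm] => "CMP          0x" ++ pvFmtHex 2 imm
   | [0x60] => "JNE_FAIL"
   | [0xA0, lo, hi] => "GUARD_DECOY 0x" ++ pvFmtHex 4 (PySem.Int.bor (hi <<< (8:Nat)) lo)
   | [0x90, tok] => "DEAD_ISLAND  0x" ++ pvFmtHex 2 tok
   | [0x70] => "RET_OK"
   | [0x71] => "RET_FAIL"
   | op :: _ => "DB           0x" ++ pvFmtHex 2 op
   | [] => "")  -- unreachable: every rendered chunk starts at an offset < len(plain)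

def disasm_alt (plain : List Int) : String :=
  let cuts := segLoop plain plain.length 0
  PySem.Str.join "\n"
    ((cuts.zip cuts.tail).map
      (fun p => pvRender p.1 (PySem.List.slice plain (some (p.1 : Int)) (some (p.2 : Int)))))

-- ===== PRECONDITION & SPEC =====
-- operand bytes an opcode consumes (spec-side mirror of the instruction grammar)
def pvOpLen (op : Int) : Nat :=
  if op = 0x10 ∨ op = 0x20 ∨ op = 0x30 ∨ op = 0x40 ∨ op = 0x50 ∨ op = 0x90 then 1
  else if op = 0xA0 then 2 else 0

-- shape of well-formed bytecode: each opcode is followed by its operand bytes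
-- (structural grammar check on the list, no execution involved)
def pvWF : List Int → Bool
  | [] => true
  | op :: rest =>
    match pvOpLen op, rest with
    | 0, r => pvWF r
    | 1, _ :: r => pvWF r
    | 2, _ :: _ :: r => pvWF r
    | _, _ => false

-- Pre_ excludes exactly the truncated bytecode streams on which A raises IndexError
-- reading an operand past the end of the list; A returns normally on every other input.
def Pre_disasm (plain : List Int) : Prop := pvWF plain = true
instance (plain : List Int) : Decidable (Pre_disasm plain) := by unfold Pre_disasm; infer_instance

def pvWitness_disasm : List Int := [0x10, 3, 0x20, 0xAB, 0xA0, 1, 2, 0x05, 0x70]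

def Spec_disasm (plain : List Int) (out : String) : Prop := out = disasm_alt plain
instance (plain : List Int) (out : String) : Decidable (Spec_disasm plain out) := by unfold Spec_disasm; infer_instance

-- ===== CLAIM (what is proved, stated in full; the proofs are below) =====
def Claim_equal_disasm : Prop := ∀ (plain : List Int), Dom_disasm plain → Pre_disasm plain → Spec_disasm plain (disasm plain)

-- ===== LEMMAS AND PROOFS =====

-- the common reference listing: what instruction starts at offset i contributes, recursively
def renderFrom (plain : List Int) (i : Nat) : List String :=
  if h : i < plain.length then
    pvRender i (PySem.List.slice plain (some (i : Int)) (some ((i + 1 + PySem.Dict.getD pvLenTable plain[i] 0 : Nat) : Int)))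
      :: renderFrom plain (i + 1 + PySem.Dict.getD pvLenTable plain[i] 0)
  else []
  termination_by plain.length - i
  decreasing_by omega

theorem segLoop_head (plain : List Int) (fuel i : Nat) : ∃ t, segLoop plain fuel i = i :: t := by
  cases fuel with
  | zero => exact ⟨[], rfl⟩
  | succ fuel =>
    rw [segLoop]
    split
    · exact ⟨_, rfl⟩
    · exact ⟨[], rfl⟩

-- B's zip-of-cuts formatting pass equals the reference listing
theorem alt_renderFrom (plain : List Int) :
    ∀ fuel i, plain.length - i ≤ fuel →
      ((segLoop plain fuel i).zip (segLoop plain fuel i).tail).map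
        (fun p => pvRender p.1 (PySem.List.slice plain (some (p.1 : Int)) (some (p.2 : Int))))
      = renderFrom plain i := by
  intro fuel
  induction fuel with
  | zero =>
    intro i hk
    have hi : ¬ i < plain.length := by omega
    rw [renderFrom, dif_neg hi]
    rfl
  | succ k IH =>
    intro i hk
    by_cases hi : i < plain.length
    · rw [segLoop, dif_pos hi, renderFrom, dif_pos hi]
      obtain ⟨t, ht⟩ := segLoop_head plain k (i + 1 + PySem.Dict.getD pvLenTable plain[i] 0)
      rw [ht]
      simp only [List.tail_cons, List.zip_cons_cons, List.map_cons]
      have htt : (segLoop plain k (i + 1 + PySem.Dict.getD pvLenTable plain[i] 0)).tail = t := by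
        rw [ht]; rfl
      rw [← ht, ← htt, IH (i + 1 + PySem.Dict.getD pvLenTable plain[i] 0) (by omega)]
    · rw [segLoop, dif_neg hi, renderFrom, dif_neg hi]
      rfl

-- chunk slices: one, two, three bytes starting at a valid offset
theorem slice_one (plain : List Int) (i : Nat) (h : i < plain.length) :
    PySem.List.slice plain (some (i : Int)) (some ((i + 1 : Nat) : Int)) = [plain[i]] := by
  rw [PySem.List.slice_natCast]
  have e : i + 1 - i = 1 := by omega
  rw [e, ← List.getElem_cons_drop h]
  rfl

theorem slice_two (plain : List Int) (i : Nat) (h : i + 1 < plain.length) :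
    PySem.List.slice plain (some (i : Int)) (some ((i + 2 : Nat) : Int)) = [plain[i], plain[i+1]] := by
  rw [PySem.List.slice_natCast]
  have e : i + 2 - i = 2 := by omega
  rw [e, ← List.getElem_cons_drop (show i < plain.length by omega), ← List.getElem_cons_drop h]
  rfl

theorem slice_three (plain : List Int) (i : Nat) (h : i + 2 < plain.length) :
    PySem.List.slice plain (some (i : Int)) (some ((i + 3 : Nat) : Int)) = [plain[i], plain[i+1], plain[i+2]] := by
  rw [PySem.List.slice_natCast]
  have e : i + 3 - i = 3 := by omega
  rw [e, ← List.getElem_cons_drop (show i < plain.length by omega),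
      ← List.getElem_cons_drop (show i + 1 < plain.length by omega),
      ← List.getElem_cons_drop h]
  rfl

-- what well-formedness gives at an opcode of each arity
theorem pvWF_step0 (plain : List Int) (i : Nat) (h : i < plain.length)
    (hL : pvOpLen plain[i] = 0) (hwf : pvWF (plain.drop i) = true) :
    pvWF (plain.drop (i+1)) = true := by
  rw [← List.getElem_cons_drop h] at hwf
  simpa only [pvWF, hL] using hwf

theorem pvWF_step1 (plain : List Int) (i : Nat) (h : i < plain.length)
    (hL : pvOpLen plain[i] = 1) (hwf : pvWF (plain.drop i) = true) :
    i + 1 < plain.length ∧ pvWF (plain.drop (i+2)) = true := by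
  rw [← List.getElem_cons_drop h] at hwf
  cases hr : plain.drop (i+1) with
  | nil => rw [hr] at hwf; simp [pvWF, hL] at hwf
  | cons x t =>
    rw [hr] at hwf
    simp only [pvWF, hL] at hwf
    have hlen : (plain.drop (i+1)).length = plain.length - (i+1) := List.length_drop
    rw [hr] at hlen
    refine ⟨by simp at hlen; omega, ?_⟩
    have htail : t = plain.drop (i+2) := by
      have h2 := List.tail_drop (l := plain) (i := i+1)
      rw [hr] at h2
      have e : i + 1 + 1 = i + 2 := rfl
      rw [e] at h2
      simpa using h2
    rwa [← htail]

theorem pvWF_step2 (plain : List Int) (i : Nat) (h : i < plain.length)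
    (hL : pvOpLen plain[i] = 2) (hwf : pvWF (plain.drop i) = true) :
    i + 2 < plain.length ∧ pvWF (plain.drop (i+3)) = true := by
  rw [← List.getElem_cons_drop h] at hwf
  cases hr : plain.drop (i+1) with
  | nil => rw [hr] at hwf; simp [pvWF, hL] at hwf
  | cons x t =>
    cases hs : t with
    | nil => rw [hr, hs] at hwf; simp [pvWF, hL] at hwf
    | cons y u =>
      rw [hr, hs] at hwf
      simp only [pvWF, hL] at hwf
      have hlen : (plain.drop (i+1)).length = plain.length - (i+1) := List.length_drop
      rw [hr, hs] at hlen
      refine ⟨by simp at hlen; omega, ?_⟩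
      have htail : t = plain.drop (i+2) := by
        have h2 := List.tail_drop (l := plain) (i := i+1)
        rw [hr] at h2
        have e : i + 1 + 1 = i + 2 := rfl
        rw [e] at h2
        simpa using h2
      have htail2 : u = plain.drop (i+3) := by
        have h3 := List.tail_drop (l := plain) (i := i+2)
        rw [← htail, hs] at h3
        have e : i + 2 + 1 = i + 3 := rfl
        rw [e] at h3
        simpa using h3
      rwa [← htail2]

-- default lookup: an opcode outside the table consumes no operand bytes
theorem getD_pvLenTable_default (op : Int) (h1 : op ≠ 16) (h2 : op ≠ 32) (h3 : op ≠ 48)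
    (h4 : op ≠ 64) (h5 : op ≠ 80) (h6 : op ≠ 144) (h7 : op ≠ 160) :
    PySem.Dict.getD pvLenTable op 0 = 0 := by
  have h : pvLenTable.items = [(16,1),(32,1),(48,1),(64,1),(80,1),(144,1),(160,2)] := by rfl
  have hf : List.find? (fun p => p.1 == op) pvLenTable.items = none := by
    rw [h, List.find?_eq_none]
    intro x hx
    simp only [List.mem_cons, List.not_mem_nil, or_false] at hx
    rcases hx with rfl|rfl|rfl|rfl|rfl|rfl|rfl <;>
      simp [Ne.symm h1, Ne.symm h2, Ne.symm h3, Ne.symm h4, Ne.symm h5, Ne.symm h6, Ne.symm h7]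
  simp [PySem.Dict.getD, PySem.Dict.get?, hf]

theorem pvRender_default (off : Nat) (op : Int) (h1 : op ≠ 161) (h2 : op ≠ 96)
    (h3 : op ≠ 112) (h4 : op ≠ 113) :
    pvRender off [op] = pvFmtHex 4 (off : Int) ++ ": " ++ ("DB           0x" ++ pvFmtHex 2 op) := by
  unfold pvRender
  split
  all_goals simp_all

-- A's loop, run on well-formed bytecode from offset i, appends exactly the reference listing
set_option maxHeartbeats 1600000 in
theorem A_renderFrom (plain : List Int) :
    ∀ fuel i out, plain.length - i ≤ fuel → pvWF (plain.drop i) = true →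
      disasmLoop plain fuel i out = out ++ renderFrom plain i := by
  intro fuel
  induction fuel with
  | zero =>
    intro i out hk _
    have hi : ¬ i < plain.length := by omega
    rw [renderFrom, dif_neg hi, List.append_nil]
    rfl
  | succ k IH =>
    intro i out hk hwf
    by_cases hi : i < plain.length
    · rw [disasmLoop, dif_pos hi, renderFrom, dif_pos hi]
      simp only []
      by_cases h1 : plain[i] = 16
      · have hL : pvOpLen plain[i] = 1 := by simp [pvOpLen, h1]
        obtain ⟨hib, hwf'⟩ := pvWF_step1 plain i hi hL hwf
        have hg : PySem.Dict.getD pvLenTable (16 : Int) 0 = 1 := rfl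
        rw [h1]
        simp only [Int.reduceEq, reduceIte]
        rw [hg]
        have e : i + 1 + 1 = i + 2 := rfl
        rw [e]
        simp only [List.getElem?_eq_getElem hib]
        rw [slice_two plain i hib, h1]
        rw [IH (i+2) _ (by omega) hwf']
        simp only [pvRender, String.append_assoc, List.append_assoc, List.cons_append, List.nil_append]
      by_cases h2 : plain[i] = 161
      · have hL : pvOpLen plain[i] = 0 := by simp [pvOpLen, h2]
        have hwf' := pvWF_step0 plain i hi hL hwf
        have hg : PySem.Dict.getD pvLenTable (161 : Int) 0 = 0 := rfl
        rw [h2]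
        simp only [Int.reduceEq, reduceIte]
        rw [hg]
        have e : i + 1 + 0 = i + 1 := rfl
        rw [e, slice_one plain i hi, h2]
        rw [IH (i+1) _ (by omega) hwf']
        simp only [pvRender, String.append_assoc, List.append_assoc, List.cons_append, List.nil_append]
      by_cases h3 : plain[i] = 32
      · have hL : pvOpLen plain[i] = 1 := by simp [pvOpLen, h3]
        obtain ⟨hib, hwf'⟩ := pvWF_step1 plain i hi hL hwf
        have hg : PySem.Dict.getD pvLenTable (32 : Int) 0 = 1 := rfl
        rw [h3]
        simp only [Int.reduceEq, reduceIte]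
        rw [hg]
        have e : i + 1 + 1 = i + 2 := rfl
        rw [e]
        simp only [List.getElem?_eq_getElem hib]
        rw [slice_two plain i hib, h3]
        rw [IH (i+2) _ (by omega) hwf']
        simp only [pvRender, String.append_assoc, List.append_assoc, List.cons_append, List.nil_append]
      by_cases h4 : plain[i] = 48
      · have hL : pvOpLen plain[i] = 1 := by simp [pvOpLen, h4]
        obtain ⟨hib, hwf'⟩ := pvWF_step1 plain i hi hL hwf
        have hg : PySem.Dict.getD pvLenTable (48 : Int) 0 = 1 := rfl
        rw [h4]
        simp only [Int.reduceEq, reduceIte]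
        rw [hg]
        have e : i + 1 + 1 = i + 2 := rfl
        rw [e]
        simp only [List.getElem?_eq_getElem hib]
        rw [slice_two plain i hib, h4]
        rw [IH (i+2) _ (by omega) hwf']
        simp only [pvRender, String.append_assoc, List.append_assoc, List.cons_append, List.nil_append]
      by_cases h5 : plain[i] = 64
      · have hL : pvOpLen plain[i] = 1 := by simp [pvOpLen, h5]
        obtain ⟨hib, hwf'⟩ := pvWF_step1 plain i hi hL hwf
        have hg : PySem.Dict.getD pvLenTable (64 : Int) 0 = 1 := rfl
        rw [h5]
        simp only [Int.reduceEq, reduceIte]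
        rw [hg]
        have e : i + 1 + 1 = i + 2 := rfl
        rw [e]
        simp only [List.getElem?_eq_getElem hib]
        rw [slice_two plain i hib, h5]
        rw [IH (i+2) _ (by omega) hwf']
        simp only [pvRender, String.append_assoc, List.append_assoc, List.cons_append, List.nil_append]
      by_cases h6 : plain[i] = 80
      · have hL : pvOpLen plain[i] = 1 := by simp [pvOpLen, h6]
        obtain ⟨hib, hwf'⟩ := pvWF_step1 plain i hi hL hwf
        have hg : PySem.Dict.getD pvLenTable (80 : Int) 0 = 1 := rfl
        rw [h6]
        simp only [Int.reduceEq, reduceIte]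
        rw [hg]
        have e : i + 1 + 1 = i + 2 := rfl
        rw [e]
        simp only [List.getElem?_eq_getElem hib]
        rw [slice_two plain i hib, h6]
        rw [IH (i+2) _ (by omega) hwf']
        simp only [pvRender, String.append_assoc, List.append_assoc, List.cons_append, List.nil_append]
      by_cases h7 : plain[i] = 96
      · have hL : pvOpLen plain[i] = 0 := by simp [pvOpLen, h7]
        have hwf' := pvWF_step0 plain i hi hL hwf
        have hg : PySem.Dict.getD pvLenTable (96 : Int) 0 = 0 := rfl
        rw [h7]
        simp only [Int.reduceEq, reduceIte]
        rw [hg]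
        have e : i + 1 + 0 = i + 1 := rfl
        rw [e, slice_one plain i hi, h7]
        rw [IH (i+1) _ (by omega) hwf']
        simp only [pvRender, String.append_assoc, List.append_assoc, List.cons_append, List.nil_append]
      by_cases h8 : plain[i] = 160
      · have hL : pvOpLen plain[i] = 2 := by simp [pvOpLen, h8]
        obtain ⟨hib, hwf'⟩ := pvWF_step2 plain i hi hL hwf
        have hg : PySem.Dict.getD pvLenTable (160 : Int) 0 = 2 := rfl
        rw [h8]
        simp only [Int.reduceEq, reduceIte]
        rw [hg]
        have e : i + 1 + 2 = i + 3 := rfl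
        rw [e]
        simp only [List.getElem?_eq_getElem (show i + 1 < plain.length by omega),
          List.getElem?_eq_getElem hib]
        rw [slice_three plain i hib, h8]
        rw [IH (i+3) _ (by omega) hwf']
        simp only [pvRender, String.append_assoc, List.append_assoc, List.cons_append, List.nil_append]
      by_cases h9 : plain[i] = 144
      · have hL : pvOpLen plain[i] = 1 := by simp [pvOpLen, h9]
        obtain ⟨hib, hwf'⟩ := pvWF_step1 plain i hi hL hwf
        have hg : PySem.Dict.getD pvLenTable (144 : Int) 0 = 1 := rfl
        rw [h9]
        simp only [Int.reduceEq, reduceIte]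
        rw [hg]
        have e : i + 1 + 1 = i + 2 := rfl
        rw [e]
        simp only [List.getElem?_eq_getElem hib]
        rw [slice_two plain i hib, h9]
        rw [IH (i+2) _ (by omega) hwf']
        simp only [pvRender, String.append_assoc, List.append_assoc, List.cons_append, List.nil_append]
      by_cases h10 : plain[i] = 112
      · have hL : pvOpLen plain[i] = 0 := by simp [pvOpLen, h10]
        have hwf' := pvWF_step0 plain i hi hL hwf
        have hg : PySem.Dict.getD pvLenTable (112 : Int) 0 = 0 := rfl
        rw [h10]
        simp only [Int.reduceEq, reduceIte]
        rw [hg]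
        have e : i + 1 + 0 = i + 1 := rfl
        rw [e, slice_one plain i hi, h10]
        rw [IH (i+1) _ (by omega) hwf']
        simp only [pvRender, String.append_assoc, List.append_assoc, List.cons_append, List.nil_append]
      by_cases h11 : plain[i] = 113
      · have hL : pvOpLen plain[i] = 0 := by simp [pvOpLen, h11]
        have hwf' := pvWF_step0 plain i hi hL hwf
        have hg : PySem.Dict.getD pvLenTable (113 : Int) 0 = 0 := rfl
        rw [h11]
        simp only [Int.reduceEq, reduceIte]
        rw [hg]
        have e : i + 1 + 0 = i + 1 := rfl
        rw [e, slice_one plain i hi, h11]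
        rw [IH (i+1) _ (by omega) hwf']
        simp only [pvRender, String.append_assoc, List.append_assoc, List.cons_append, List.nil_append]
      -- default: DB data byte, no operands on either side
      · have hL : pvOpLen plain[i] = 0 := by simp [pvOpLen, h1, h3, h4, h5, h6, h8, h9]
        have hwf' := pvWF_step0 plain i hi hL hwf
        have hg : PySem.Dict.getD pvLenTable plain[i] 0 = 0 :=
          getD_pvLenTable_default plain[i] h1 h3 h4 h5 h6 h9 h8
        rw [if_neg h1, if_neg h2, if_neg h3, if_neg h4, if_neg h5, if_neg h6, if_neg h7, if_neg h8, if_neg h9, if_neg h10, if_neg h11, hg]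
        have e : i + 1 + 0 = i + 1 := rfl
        rw [e, slice_one plain i hi, pvRender_default i plain[i] h2 h7 h10 h11]
        rw [IH (i+1) _ (by omega) hwf']
        simp only [String.append_assoc, List.append_assoc, List.cons_append, List.nil_append]
    · rw [disasmLoop, dif_neg hi, renderFrom, dif_neg hi, List.append_nil]

-- ===== VERDICT (by name: the statements are the Claim_ definitions above) =====
theorem disasm_spec : Claim_equal_disasm := by
  intro plain _ hpre
  unfold Spec_disasm
  simp only [disasm, disasm_alt]
  rw [A_renderFrom plain plain.length 0 [] (by omega) (by simpa [Pre_disasm] using hpre)]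
  rw [alt_renderFrom plain plain.length 0 (by omega)]
  rfl
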